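-- pv_equiv track=rewrite | github.com/mallcop-app/mallcop | src/mallcop/actors/heal/__init__.py | _build_event_mapping
-- ===== SOURCE A (Python) =====
-- def _build_event_mapping(app_name: str, groups: list[str]) -> dict[str, str]:
--     """Build an event_mapping dict from captured group names."""
--     mapping: dict[str, str] = {
--         "actor": app_name,
--         "action": "log",
--         "target": app_name,
--         "severity": "info",
--     }
--
--     # Map known group names to event fields
--     for g in groups:
--         g_lower = g.lower()
--         if g_lower in ("level", "severity", "log_level"):
--             mapping["severity"] = f"{{{g}}}"
--         elif g_lower in ("actor", "user", "username", "identity"):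
--             mapping["actor"] = f"{{{g}}}"
--         elif g_lower in ("action", "method", "operation", "verb"):
--             mapping["action"] = f"{{{g}}}"
--         elif g_lower in ("target", "resource", "path", "url"):
--             mapping["target"] = f"{{{g}}}"
--         elif g_lower in ("event_type", "event", "type"):
--             mapping["event_type"] = f"{{{g}}}"
--
--     if "event_type" not in mapping:
--         mapping["event_type"] = "log_line"
--
--     return mapping
-- ===== SOURCE B (Python) =====
-- _FIELDS = [
--     ("actor", ("actor", "user", "username", "identity"), None),
--     ("action", ("action", "method", "operation", "verb"), "log"),
--     ("target", ("target", "resource", "path", "url"), None),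
--     ("severity", ("level", "severity", "log_level"), "info"),
--     ("event_type", ("event_type", "event", "type"), "log_line"),
-- ]
--
--
-- def _build_event_mapping(app_name: str, groups: list[str]) -> dict[str, str]:
--     """Build an event_mapping dict from captured group names."""
--     result: dict[str, str] = {}
--     for field, aliases, default in _FIELDS:
--         value = app_name if default is None else default
--         for g in reversed(groups):
--             if g.lower() in aliases:
--                 value = f"{{{g}}}"
--                 break
--         result[field] = value
--     return result
-- ===== Notes on version B (the rewrite author's own statement) =====
-- stated objective: alternative
-- what changed: Replaces A's single forward pass that mutates a defaults dict through a five-way elif chain with a staged per-field computation: for each of the five output fields, scan the groups in reverse for the first alias match (the last match in original order) and emit the field's value directly, building the result list field by field with no mutable mapping.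
import Mathlib
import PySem

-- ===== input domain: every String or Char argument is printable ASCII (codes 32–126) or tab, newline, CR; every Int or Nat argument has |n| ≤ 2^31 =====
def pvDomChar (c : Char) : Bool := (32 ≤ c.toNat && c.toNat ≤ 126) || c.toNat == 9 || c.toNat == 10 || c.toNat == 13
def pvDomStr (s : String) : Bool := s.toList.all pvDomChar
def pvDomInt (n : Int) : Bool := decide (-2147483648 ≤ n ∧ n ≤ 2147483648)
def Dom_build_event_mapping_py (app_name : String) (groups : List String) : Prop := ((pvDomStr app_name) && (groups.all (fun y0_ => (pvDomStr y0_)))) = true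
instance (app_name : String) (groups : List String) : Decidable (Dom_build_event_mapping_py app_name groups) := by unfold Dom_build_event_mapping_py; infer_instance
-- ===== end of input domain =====

-- B replaces A's single mutating pass over a defaults dict with a staged per-field
-- computation (for each field, a reverse scan for the last matching alias); same O(n) cost.

-- ===== PORT A =====
def build_event_mapping_py (app_name : String) (groups : List String) : List (String × String) :=
  let mapping : PySem.Dict String String :=
    PySem.Dict.ofList [("actor", app_name), ("action", "log"), ("target", app_name), ("severity", "info")]
  let mapping := groups.foldl (fun mapping g =>
    let g_lower := PySem.Str.lower g
    if g_lower == "level" || g_lower == "severity" || g_lower == "log_level" then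
      mapping.insert "severity" ("{" ++ g ++ "}")
    else if g_lower == "actor" || g_lower == "user" || g_lower == "username" || g_lower == "identity" then
      mapping.insert "actor" ("{" ++ g ++ "}")
    else if g_lower == "action" || g_lower == "method" || g_lower == "operation" || g_lower == "verb" then
      mapping.insert "action" ("{" ++ g ++ "}")
    else if g_lower == "target" || g_lower == "resource" || g_lower == "path" || g_lower == "url" then
      mapping.insert "target" ("{" ++ g ++ "}")
    else if g_lower == "event_type" || g_lower == "event" || g_lower == "type" then
      mapping.insert "event_type" ("{" ++ g ++ "}")
    else mapping) mapping
  let mapping := if mapping.contains "event_type" then mapping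
                 else mapping.insert "event_type" "log_line"
  mapping.items

-- ===== PORT B =====
-- the _FIELDS table of Source B: (field, aliases, default); default none means app_name
def pvFields : List (String × List String × Option String) :=
  [("actor", ["actor", "user", "username", "identity"], none),
   ("action", ["action", "method", "operation", "verb"], some "log"),
   ("target", ["target", "resource", "path", "url"], none),
   ("severity", ["level", "severity", "log_level"], some "info"),
   ("event_type", ["event_type", "event", "type"], some "log_line")]

-- Source B's inner 'for g in reversed(groups): if match: value = …; break' loop
def pvLastMatch (aliases : List String) (dflt : String) (gs : List String) : String :=
  match gs with
  | [] => dflt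
  | g :: rest =>
    if aliases.contains (PySem.Str.lower g) then "{" ++ g ++ "}"
    else pvLastMatch aliases dflt rest

def build_event_mapping_py_alt (app_name : String) (groups : List String) : List (String × String) :=
  pvFields.map (fun fld =>
    (fld.1, pvLastMatch fld.2.1 ((fld.2.2).getD app_name) groups.reverse))

-- ===== PRECONDITION & SPEC =====
def Spec_build_event_mapping_py (app_name : String) (groups : List String) (out : List (String × String)) : Prop := out = build_event_mapping_py_alt app_name groups
instance (app_name : String) (groups : List String) (out : List (String × String)) : Decidable (Spec_build_event_mapping_py app_name groups out) := by unfold Spec_build_event_mapping_py; infer_instance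

-- ===== CLAIM (what is proved, stated in full; the proofs are below) =====
def Claim_equal_build_event_mapping_py : Prop := ∀ (app_name : String) (groups : List String), Dom_build_event_mapping_py app_name groups → Spec_build_event_mapping_py app_name groups (build_event_mapping_py app_name groups)

-- ===== LEMMAS AND PROOFS =====

-- A's loop body as a named function (proof helper; defeq to the lambda in the port)
def pvStepA (mapping : PySem.Dict String String) (g : String) : PySem.Dict String String :=
  if PySem.Str.lower g == "level" || PySem.Str.lower g == "severity" || PySem.Str.lower g == "log_level" then
    mapping.insert "severity" ("{" ++ g ++ "}")
  else if PySem.Str.lower g == "actor" || PySem.Str.lower g == "user" || PySem.Str.lower g == "username" || PySem.Str.lower g == "identity" then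
    mapping.insert "actor" ("{" ++ g ++ "}")
  else if PySem.Str.lower g == "action" || PySem.Str.lower g == "method" || PySem.Str.lower g == "operation" || PySem.Str.lower g == "verb" then
    mapping.insert "action" ("{" ++ g ++ "}")
  else if PySem.Str.lower g == "target" || PySem.Str.lower g == "resource" || PySem.Str.lower g == "path" || PySem.Str.lower g == "url" then
    mapping.insert "target" ("{" ++ g ++ "}")
  else if PySem.Str.lower g == "event_type" || PySem.Str.lower g == "event" || PySem.Str.lower g == "type" then
    mapping.insert "event_type" ("{" ++ g ++ "}")
  else mapping

-- the shape A's dict always has: four fixed keys, plus event_type once it appears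
def pvBase (a b c d : String) (e : Option String) : PySem.Dict String String :=
  match e with
  | none => PySem.Dict.mk [("actor", a), ("action", b), ("target", c), ("severity", d)]
  | some v => PySem.Dict.mk [("actor", a), ("action", b), ("target", c), ("severity", d), ("event_type", v)]

-- Option-valued last-match (tracks whether event_type was ever set)
def pvLastMatchO (aliases : List String) (e : Option String) (gs : List String) : Option String :=
  match gs with
  | [] => e
  | g :: rest =>
    if aliases.contains (PySem.Str.lower g) then some ("{" ++ g ++ "}")
    else pvLastMatchO aliases e rest

theorem pvLastMatch_append_pos (A : List String) (d : String) (xs : List String) (g : String)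
    (h : A.contains (PySem.Str.lower g) = true) :
    pvLastMatch A d (xs ++ [g]) = pvLastMatch A ("{" ++ g ++ "}") xs := by
  induction xs with
  | nil => simp only [List.nil_append, pvLastMatch]; rw [if_pos h]
  | cons x xs ih => simp only [List.cons_append, pvLastMatch]; rw [ih]

theorem pvLastMatch_append_neg (A : List String) (d : String) (xs : List String) (g : String)
    (h : A.contains (PySem.Str.lower g) = false) :
    pvLastMatch A d (xs ++ [g]) = pvLastMatch A d xs := by
  induction xs with
  | nil => simp only [List.nil_append, pvLastMatch]; rw [if_neg (by rw [h]; simp)]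
  | cons x xs ih => simp only [List.cons_append, pvLastMatch]; rw [ih]

theorem pvLastMatchO_append_pos (A : List String) (e : Option String) (xs : List String) (g : String)
    (h : A.contains (PySem.Str.lower g) = true) :
    pvLastMatchO A e (xs ++ [g]) = pvLastMatchO A (some ("{" ++ g ++ "}")) xs := by
  induction xs with
  | nil => simp only [List.nil_append, pvLastMatchO]; rw [if_pos h]
  | cons x xs ih => simp only [List.cons_append, pvLastMatchO]; rw [ih]

theorem pvLastMatchO_append_neg (A : List String) (e : Option String) (xs : List String) (g : String)
    (h : A.contains (PySem.Str.lower g) = false) :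
    pvLastMatchO A e (xs ++ [g]) = pvLastMatchO A e xs := by
  induction xs with
  | nil => simp only [List.nil_append, pvLastMatchO]; rw [if_neg (by rw [h]; simp)]
  | cons x xs ih => simp only [List.cons_append, pvLastMatchO]; rw [ih]

theorem pvLastMatchO_getD (A : List String) (d : String) (xs : List String) :
    pvLastMatch A d xs = (pvLastMatchO A none xs).getD d := by
  induction xs with
  | nil => rfl
  | cons x xs ih => simp only [pvLastMatch, pvLastMatchO]; split_ifs <;> simp [ih]

-- step lemmas for pvStepA, one per branch
theorem pvStepA_1 (st : PySem.Dict String String) (g : String)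
    (h1 : (PySem.Str.lower g == "level" || PySem.Str.lower g == "severity" || PySem.Str.lower g == "log_level") = true) :
    pvStepA st g = st.insert "severity" ("{" ++ g ++ "}") := by
  unfold pvStepA; rw [if_pos h1]

theorem pvStepA_2 (st : PySem.Dict String String) (g : String)
    (h1 : ¬ (PySem.Str.lower g == "level" || PySem.Str.lower g == "severity" || PySem.Str.lower g == "log_level") = true)
    (h2 : (PySem.Str.lower g == "actor" || PySem.Str.lower g == "user" || PySem.Str.lower g == "username" || PySem.Str.lower g == "identity") = true) :
    pvStepA st g = st.insert "actor" ("{" ++ g ++ "}") := by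
  unfold pvStepA; rw [if_neg h1, if_pos h2]

theorem pvStepA_3 (st : PySem.Dict String String) (g : String)
    (h1 : ¬ (PySem.Str.lower g == "level" || PySem.Str.lower g == "severity" || PySem.Str.lower g == "log_level") = true)
    (h2 : ¬ (PySem.Str.lower g == "actor" || PySem.Str.lower g == "user" || PySem.Str.lower g == "username" || PySem.Str.lower g == "identity") = true)
    (h3 : (PySem.Str.lower g == "action" || PySem.Str.lower g == "method" || PySem.Str.lower g == "operation" || PySem.Str.lower g == "verb") = true) :
    pvStepA st g = st.insert "action" ("{" ++ g ++ "}") := by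
  unfold pvStepA; rw [if_neg h1, if_neg h2, if_pos h3]

theorem pvStepA_4 (st : PySem.Dict String String) (g : String)
    (h1 : ¬ (PySem.Str.lower g == "level" || PySem.Str.lower g == "severity" || PySem.Str.lower g == "log_level") = true)
    (h2 : ¬ (PySem.Str.lower g == "actor" || PySem.Str.lower g == "user" || PySem.Str.lower g == "username" || PySem.Str.lower g == "identity") = true)
    (h3 : ¬ (PySem.Str.lower g == "action" || PySem.Str.lower g == "method" || PySem.Str.lower g == "operation" || PySem.Str.lower g == "verb") = true)
    (h4 : (PySem.Str.lower g == "target" || PySem.Str.lower g == "resource" || PySem.Str.lower g == "path" || PySem.Str.lower g == "url") = true) :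
    pvStepA st g = st.insert "target" ("{" ++ g ++ "}") := by
  unfold pvStepA; rw [if_neg h1, if_neg h2, if_neg h3, if_pos h4]

theorem pvStepA_5 (st : PySem.Dict String String) (g : String)
    (h1 : ¬ (PySem.Str.lower g == "level" || PySem.Str.lower g == "severity" || PySem.Str.lower g == "log_level") = true)
    (h2 : ¬ (PySem.Str.lower g == "actor" || PySem.Str.lower g == "user" || PySem.Str.lower g == "username" || PySem.Str.lower g == "identity") = true)
    (h3 : ¬ (PySem.Str.lower g == "action" || PySem.Str.lower g == "method" || PySem.Str.lower g == "operation" || PySem.Str.lower g == "verb") = true)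
    (h4 : ¬ (PySem.Str.lower g == "target" || PySem.Str.lower g == "resource" || PySem.Str.lower g == "path" || PySem.Str.lower g == "url") = true)
    (h5 : (PySem.Str.lower g == "event_type" || PySem.Str.lower g == "event" || PySem.Str.lower g == "type") = true) :
    pvStepA st g = st.insert "event_type" ("{" ++ g ++ "}") := by
  unfold pvStepA; rw [if_neg h1, if_neg h2, if_neg h3, if_neg h4, if_pos h5]

theorem pvStepA_6 (st : PySem.Dict String String) (g : String)
    (h1 : ¬ (PySem.Str.lower g == "level" || PySem.Str.lower g == "severity" || PySem.Str.lower g == "log_level") = true)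
    (h2 : ¬ (PySem.Str.lower g == "actor" || PySem.Str.lower g == "user" || PySem.Str.lower g == "username" || PySem.Str.lower g == "identity") = true)
    (h3 : ¬ (PySem.Str.lower g == "action" || PySem.Str.lower g == "method" || PySem.Str.lower g == "operation" || PySem.Str.lower g == "verb") = true)
    (h4 : ¬ (PySem.Str.lower g == "target" || PySem.Str.lower g == "resource" || PySem.Str.lower g == "path" || PySem.Str.lower g == "url") = true)
    (h5 : ¬ (PySem.Str.lower g == "event_type" || PySem.Str.lower g == "event" || PySem.Str.lower g == "type") = true) :
    pvStepA st g = st := by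
  unfold pvStepA; rw [if_neg h1, if_neg h2, if_neg h3, if_neg h4, if_neg h5]

-- A's loop preserves the pvBase shape and computes last matches
set_option maxHeartbeats 1000000 in
theorem pv_fold_base (gs : List String) : ∀ (a b c d : String) (e : Option String),
    gs.foldl pvStepA (pvBase a b c d e) =
    pvBase (pvLastMatch ["actor", "user", "username", "identity"] a gs.reverse)
           (pvLastMatch ["action", "method", "operation", "verb"] b gs.reverse)
           (pvLastMatch ["target", "resource", "path", "url"] c gs.reverse)
           (pvLastMatch ["level", "severity", "log_level"] d gs.reverse)
           (pvLastMatchO ["event_type", "event", "type"] e gs.reverse) := by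
  induction gs with
  | nil => intro a b c d e; rfl
  | cons g gs ih =>
    intro a b c d e
    rw [List.foldl_cons, List.reverse_cons]
    by_cases h1 : (PySem.Str.lower g == "level" || PySem.Str.lower g == "severity" || PySem.Str.lower g == "log_level") = true
    · have h1' : PySem.Str.lower g = "level" ∨ PySem.Str.lower g = "severity" ∨ PySem.Str.lower g = "log_level" := by
        simpa [or_assoc] using h1
      have hS : (["level", "severity", "log_level"].contains (PySem.Str.lower g)) = true := by
        rcases h1' with h | h | h <;> rw [h] <;> decide
      have hA : (["actor", "user", "username", "identity"].contains (PySem.Str.lower g)) = false := by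
        rcases h1' with h | h | h <;> rw [h] <;> decide
      have hB : (["action", "method", "operation", "verb"].contains (PySem.Str.lower g)) = false := by
        rcases h1' with h | h | h <;> rw [h] <;> decide
      have hC : (["target", "resource", "path", "url"].contains (PySem.Str.lower g)) = false := by
        rcases h1' with h | h | h <;> rw [h] <;> decide
      have hE : (["event_type", "event", "type"].contains (PySem.Str.lower g)) = false := by
        rcases h1' with h | h | h <;> rw [h] <;> decide
      rw [pvStepA_1 _ _ h1, pvLastMatch_append_neg _ _ _ _ hA, pvLastMatch_append_neg _ _ _ _ hB,
          pvLastMatch_append_neg _ _ _ _ hC, pvLastMatch_append_pos _ _ _ _ hS,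
          pvLastMatchO_append_neg _ _ _ _ hE]
      cases e
      · exact ih a b c ("{" ++ g ++ "}") none
      · exact ih a b c ("{" ++ g ++ "}") (some _)
    · by_cases h2 : (PySem.Str.lower g == "actor" || PySem.Str.lower g == "user" || PySem.Str.lower g == "username" || PySem.Str.lower g == "identity") = true
      · have h2' : PySem.Str.lower g = "actor" ∨ PySem.Str.lower g = "user" ∨ PySem.Str.lower g = "username" ∨ PySem.Str.lower g = "identity" := by
          simpa [or_assoc] using h2
        have hS : (["level", "severity", "log_level"].contains (PySem.Str.lower g)) = false := by
          rcases h2' with h | h | h | h <;> rw [h] <;> decide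
        have hA : (["actor", "user", "username", "identity"].contains (PySem.Str.lower g)) = true := by
          rcases h2' with h | h | h | h <;> rw [h] <;> decide
        have hB : (["action", "method", "operation", "verb"].contains (PySem.Str.lower g)) = false := by
          rcases h2' with h | h | h | h <;> rw [h] <;> decide
        have hC : (["target", "resource", "path", "url"].contains (PySem.Str.lower g)) = false := by
          rcases h2' with h | h | h | h <;> rw [h] <;> decide
        have hE : (["event_type", "event", "type"].contains (PySem.Str.lower g)) = false := by
          rcases h2' with h | h | h | h <;> rw [h] <;> decide
        rw [pvStepA_2 _ _ h1 h2, pvLastMatch_append_pos _ _ _ _ hA, pvLastMatch_append_neg _ _ _ _ hB,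
            pvLastMatch_append_neg _ _ _ _ hC, pvLastMatch_append_neg _ _ _ _ hS,
            pvLastMatchO_append_neg _ _ _ _ hE]
        cases e
        · exact ih ("{" ++ g ++ "}") b c d none
        · exact ih ("{" ++ g ++ "}") b c d (some _)
      · by_cases h3 : (PySem.Str.lower g == "action" || PySem.Str.lower g == "method" || PySem.Str.lower g == "operation" || PySem.Str.lower g == "verb") = true
        · have h3' : PySem.Str.lower g = "action" ∨ PySem.Str.lower g = "method" ∨ PySem.Str.lower g = "operation" ∨ PySem.Str.lower g = "verb" := by
            simpa [or_assoc] using h3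
          have hS : (["level", "severity", "log_level"].contains (PySem.Str.lower g)) = false := by
            rcases h3' with h | h | h | h <;> rw [h] <;> decide
          have hA : (["actor", "user", "username", "identity"].contains (PySem.Str.lower g)) = false := by
            rcases h3' with h | h | h | h <;> rw [h] <;> decide
          have hB : (["action", "method", "operation", "verb"].contains (PySem.Str.lower g)) = true := by
            rcases h3' with h | h | h | h <;> rw [h] <;> decide
          have hC : (["target", "resource", "path", "url"].contains (PySem.Str.lower g)) = false := by
            rcases h3' with h | h | h | h <;> rw [h] <;> decide
          have hE : (["event_type", "event", "type"].contains (PySem.Str.lower g)) = false := by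
            rcases h3' with h | h | h | h <;> rw [h] <;> decide
          rw [pvStepA_3 _ _ h1 h2 h3, pvLastMatch_append_neg _ _ _ _ hA, pvLastMatch_append_pos _ _ _ _ hB,
              pvLastMatch_append_neg _ _ _ _ hC, pvLastMatch_append_neg _ _ _ _ hS,
              pvLastMatchO_append_neg _ _ _ _ hE]
          cases e
          · exact ih a ("{" ++ g ++ "}") c d none
          · exact ih a ("{" ++ g ++ "}") c d (some _)
        · by_cases h4 : (PySem.Str.lower g == "target" || PySem.Str.lower g == "resource" || PySem.Str.lower g == "path" || PySem.Str.lower g == "url") = true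
          · have h4' : PySem.Str.lower g = "target" ∨ PySem.Str.lower g = "resource" ∨ PySem.Str.lower g = "path" ∨ PySem.Str.lower g = "url" := by
              simpa [or_assoc] using h4
            have hS : (["level", "severity", "log_level"].contains (PySem.Str.lower g)) = false := by
              rcases h4' with h | h | h | h <;> rw [h] <;> decide
            have hA : (["actor", "user", "username", "identity"].contains (PySem.Str.lower g)) = false := by
              rcases h4' with h | h | h | h <;> rw [h] <;> decide
            have hB : (["action", "method", "operation", "verb"].contains (PySem.Str.lower g)) = false := by
              rcases h4' with h | h | h | h <;> rw [h] <;> decide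
            have hC : (["target", "resource", "path", "url"].contains (PySem.Str.lower g)) = true := by
              rcases h4' with h | h | h | h <;> rw [h] <;> decide
            have hE : (["event_type", "event", "type"].contains (PySem.Str.lower g)) = false := by
              rcases h4' with h | h | h | h <;> rw [h] <;> decide
            rw [pvStepA_4 _ _ h1 h2 h3 h4, pvLastMatch_append_neg _ _ _ _ hA, pvLastMatch_append_neg _ _ _ _ hB,
                pvLastMatch_append_pos _ _ _ _ hC, pvLastMatch_append_neg _ _ _ _ hS,
                pvLastMatchO_append_neg _ _ _ _ hE]
            cases e
            · exact ih a b ("{" ++ g ++ "}") d none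
            · exact ih a b ("{" ++ g ++ "}") d (some _)
          · by_cases h5 : (PySem.Str.lower g == "event_type" || PySem.Str.lower g == "event" || PySem.Str.lower g == "type") = true
            · have h5' : PySem.Str.lower g = "event_type" ∨ PySem.Str.lower g = "event" ∨ PySem.Str.lower g = "type" := by
                simpa [or_assoc] using h5
              have hS : (["level", "severity", "log_level"].contains (PySem.Str.lower g)) = false := by
                rcases h5' with h | h | h <;> rw [h] <;> decide
              have hA : (["actor", "user", "username", "identity"].contains (PySem.Str.lower g)) = false := by
                rcases h5' with h | h | h <;> rw [h] <;> decide
              have hB : (["action", "method", "operation", "verb"].contains (PySem.Str.lower g)) = false := by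
                rcases h5' with h | h | h <;> rw [h] <;> decide
              have hC : (["target", "resource", "path", "url"].contains (PySem.Str.lower g)) = false := by
                rcases h5' with h | h | h <;> rw [h] <;> decide
              have hE : (["event_type", "event", "type"].contains (PySem.Str.lower g)) = true := by
                rcases h5' with h | h | h <;> rw [h] <;> decide
              rw [pvStepA_5 _ _ h1 h2 h3 h4 h5, pvLastMatch_append_neg _ _ _ _ hA, pvLastMatch_append_neg _ _ _ _ hB,
                  pvLastMatch_append_neg _ _ _ _ hC, pvLastMatch_append_neg _ _ _ _ hS,
                  pvLastMatchO_append_pos _ _ _ _ hE]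
              cases e
              · exact ih a b c d (some ("{" ++ g ++ "}"))
              · exact ih a b c d (some ("{" ++ g ++ "}"))
            · have n1 : PySem.Str.lower g ≠ "level" ∧ PySem.Str.lower g ≠ "severity" ∧ PySem.Str.lower g ≠ "log_level" := by
                simpa [not_or, and_assoc] using h1
              have n2 : PySem.Str.lower g ≠ "actor" ∧ PySem.Str.lower g ≠ "user" ∧ PySem.Str.lower g ≠ "username" ∧ PySem.Str.lower g ≠ "identity" := by
                simpa [not_or, and_assoc] using h2
              have n3 : PySem.Str.lower g ≠ "action" ∧ PySem.Str.lower g ≠ "method" ∧ PySem.Str.lower g ≠ "operation" ∧ PySem.Str.lower g ≠ "verb" := by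
                simpa [not_or, and_assoc] using h3
              have n4 : PySem.Str.lower g ≠ "target" ∧ PySem.Str.lower g ≠ "resource" ∧ PySem.Str.lower g ≠ "path" ∧ PySem.Str.lower g ≠ "url" := by
                simpa [not_or, and_assoc] using h4
              have n5 : PySem.Str.lower g ≠ "event_type" ∧ PySem.Str.lower g ≠ "event" ∧ PySem.Str.lower g ≠ "type" := by
                simpa [not_or, and_assoc] using h5
              have hS : (["level", "severity", "log_level"].contains (PySem.Str.lower g)) = false := by
                simp [List.contains_eq_mem, n1.1, n1.2.1, n1.2.2]
              have hA : (["actor", "user", "username", "identity"].contains (PySem.Str.lower g)) = false := by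
                simp [List.contains_eq_mem, n2.1, n2.2.1, n2.2.2.1, n2.2.2.2]
              have hB : (["action", "method", "operation", "verb"].contains (PySem.Str.lower g)) = false := by
                simp [List.contains_eq_mem, n3.1, n3.2.1, n3.2.2.1, n3.2.2.2]
              have hC : (["target", "resource", "path", "url"].contains (PySem.Str.lower g)) = false := by
                simp [List.contains_eq_mem, n4.1, n4.2.1, n4.2.2.1, n4.2.2.2]
              have hE : (["event_type", "event", "type"].contains (PySem.Str.lower g)) = false := by
                simp [List.contains_eq_mem, n5.1, n5.2.1, n5.2.2]
              rw [pvStepA_6 _ _ h1 h2 h3 h4 h5, pvLastMatch_append_neg _ _ _ _ hA, pvLastMatch_append_neg _ _ _ _ hB,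
                  pvLastMatch_append_neg _ _ _ _ hC, pvLastMatch_append_neg _ _ _ _ hS,
                  pvLastMatchO_append_neg _ _ _ _ hE]
              exact ih a b c d e

theorem build_event_mapping_py_eq (app_name : String) (groups : List String) :
    build_event_mapping_py app_name groups = build_event_mapping_py_alt app_name groups := by
  have hfold : build_event_mapping_py app_name groups =
      (let m := groups.foldl pvStepA (pvBase app_name "log" app_name "info" none)
       let m := if m.contains "event_type" then m else m.insert "event_type" "log_line"
       m.items) := rfl
  rw [hfold, pv_fold_base]
  unfold build_event_mapping_py_alt pvFields
  simp only [List.map_cons, List.map_nil, Option.getD_some, Option.getD_none]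
  cases h : pvLastMatchO ["event_type", "event", "type"] none groups.reverse with
  | none =>
    simp only [pvBase, pvLastMatchO_getD, h, Option.getD_none]
    rfl
  | some v =>
    simp only [pvBase, pvLastMatchO_getD, h, Option.getD_some]
    rfl

-- ===== VERDICT (by name: the statement is the Claim_ definition above) =====
theorem build_event_mapping_py_spec : Claim_equal_build_event_mapping_py := by
  intro app_name groups _
  exact build_event_mapping_py_eq app_name groups
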